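-- pv_equiv track=rewrite | github.com/ludia8888/SPICE-Harvester | backend/oms/services/ontology_resource_validator.py | _canonicalize_ref
-- ===== SOURCE A (Python) =====
-- from typing import Any, Dict, Iterable, List, Optional, Set, Tuple
--
-- _REFERENCE_TYPE_PREFIX = {
--     "value_type:": "value_type",
--     "value:": "value_type",
--     "interface:": "interface",
--     "shared_property:": "shared_property",
--     "shared:": "shared_property",
--     "object_type:": "object_type",
--     "object:": "object",
--     "class:": "object",
-- }
--
-- def _canonicalize_ref(raw: str) -> Tuple[Optional[str], Optional[str]]:
--     ref = (raw or "").strip()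
--     if not ref:
--         return None, None
--     for prefix, ref_type in _REFERENCE_TYPE_PREFIX.items():
--         if ref.startswith(prefix):
--             return ref_type, ref[len(prefix) :].strip()
--     return None, ref
-- ===== SOURCE B (Python) =====
-- _REFERENCE_TYPE_PREFIX = {
--     "value_type:": "value_type",
--     "value:": "value_type",
--     "interface:": "interface",
--     "shared_property:": "shared_property",
--     "shared:": "shared_property",
--     "object_type:": "object_type",
--     "object:": "object",
--     "class:": "object",
-- }
--
-- def _canonicalize_ref(raw):
--     ref = (raw or "").strip()
--     if not ref:
--         return None, None
--     head, sep, tail = ref.partition(":")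
--     ref_type = _REFERENCE_TYPE_PREFIX.get(head + sep) if sep else None
--     if ref_type is None:
--         return None, ref
--     return ref_type, tail.strip()
-- ===== Notes on version B (the rewrite author's own statement) =====
-- stated objective: idiomatic
-- what changed: B replaces the ordered per-prefix startswith scan over the mapping with a single split at the first colon (str.partition) followed by one direct dictionary lookup of the computed key, guarded by whether a colon was present.
import Mathlib
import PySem

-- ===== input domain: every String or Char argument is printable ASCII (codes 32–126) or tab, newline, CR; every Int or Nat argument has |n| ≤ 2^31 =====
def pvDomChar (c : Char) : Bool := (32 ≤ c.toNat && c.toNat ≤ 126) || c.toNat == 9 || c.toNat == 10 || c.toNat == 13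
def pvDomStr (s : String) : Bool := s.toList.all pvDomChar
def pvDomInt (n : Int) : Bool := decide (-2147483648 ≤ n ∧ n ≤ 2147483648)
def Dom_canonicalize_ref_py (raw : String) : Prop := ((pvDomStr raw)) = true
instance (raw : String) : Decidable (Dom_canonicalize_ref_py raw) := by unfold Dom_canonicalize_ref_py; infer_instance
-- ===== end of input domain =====

-- B replaces A's ordered per-prefix startswith scan with a partition at the first colon and
-- one dictionary lookup of the computed key (idiomatic; same observable behaviour).

-- shared module-level constant _REFERENCE_TYPE_PREFIX (keys as List Char so the kernel can compute)
def pvRefTable : PySem.Dict (List Char) String :=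
  PySem.Dict.ofList
    [("value_type:".toList, "value_type"),
     ("value:".toList, "value_type"),
     ("interface:".toList, "interface"),
     ("shared_property:".toList, "shared_property"),
     ("shared:".toList, "shared_property"),
     ("object_type:".toList, "object_type"),
     ("object:".toList, "object"),
     ("class:".toList, "object")]

-- ===== PORT A =====
-- the 'for prefix, ref_type in _REFERENCE_TYPE_PREFIX.items(): if ref.startswith(prefix): …' loop
-- (ref[len(prefix):] is List.drop, exact for this nonnegative in-range slice)
def pvScanA (ref : List Char) : List (List Char × String) → Option String × Option String
  | [] => (none, some (String.ofList ref))
  | (p, t) :: rest =>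
      if PySem.Chars.startswith ref p then
        (some t, some (String.ofList (PySem.Chars.strip (ref.drop p.length))))
      else pvScanA ref rest

def canonicalize_ref_py (raw : String) : Option String × Option String :=
  let ref := PySem.Chars.strip raw.toList   -- (raw or "").strip(): '' stays '' either way
  if ref = [] then (none, none)
  else pvScanA ref pvRefTable.items

-- ===== PORT B =====
-- hand port of str.partition(':') (no PySem primitive): exact — head before the first ':',
-- a Bool for whether the separator was found, the rest after it
def pvPartColon : List Char → List Char × Bool × List Char
  | [] => ([], false, [])
  | c :: rest =>
      if c = ':' then ([], true, rest)
      else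
        let (h, s, t) := pvPartColon rest
        (c :: h, s, t)

def canonicalize_ref_py_alt (raw : String) : Option String × Option String :=
  let ref := PySem.Chars.strip raw.toList
  if ref = [] then (none, none)
  else
    let (head, sep, tail) := pvPartColon ref
    let refType := if sep then pvRefTable.get? (head ++ [':']) else none
    match refType with
    | none => (none, some (String.ofList ref))
    | some t => (some t, some (String.ofList (PySem.Chars.strip tail)))

-- ===== PRECONDITION & SPEC =====
def Spec_canonicalize_ref_py (raw : String) (out : Option String × Option String) : Prop := out = canonicalize_ref_py_alt raw
instance (raw : String) (out : Option String × Option String) : Decidable (Spec_canonicalize_ref_py raw out) := by unfold Spec_canonicalize_ref_py; infer_instance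

-- ===== CLAIM (what is proved, stated in full; the proofs are below) =====
def Claim_equal_canonicalize_ref_py : Prop := ∀ (raw : String), Dom_canonicalize_ref_py raw → Spec_canonicalize_ref_py raw (canonicalize_ref_py raw)

-- ===== LEMMAS AND PROOFS =====

lemma pvPartColon_false {cs h t : List Char} (hp : pvPartColon cs = (h, false, t)) :
    h = cs ∧ t = [] ∧ ':' ∉ cs := by
  induction cs generalizing h t with
  | nil => simp [pvPartColon] at hp; simp [hp.1, hp.2]
  | cons c rest ih =>
    by_cases hc : c = ':'
    · simp [pvPartColon, hc] at hp
    · rcases e : pvPartColon rest with ⟨h', s', t'⟩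
      simp [pvPartColon, hc, e] at hp
      obtain ⟨h1, h2, h3⟩ := hp
      obtain ⟨ih1, ih2, ih3⟩ := ih (by rw [e, h2, h3])
      subst h1; refine ⟨by simp [ih1], ih2, ?_⟩
      simp [ih3]
      exact fun e => hc e.symm

lemma pvPartColon_true {cs h t : List Char} (hp : pvPartColon cs = (h, true, t)) :
    cs = h ++ ':' :: t ∧ ':' ∉ h := by
  induction cs generalizing h t with
  | nil => simp [pvPartColon] at hp
  | cons c rest ih =>
    by_cases hc : c = ':'
    · simp [pvPartColon, hc] at hp
      refine ⟨by simp [hc, ← hp.1, hp.2], by simp [hp.1]⟩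
    · rcases e : pvPartColon rest with ⟨h', s', t'⟩
      simp [pvPartColon, hc, e] at hp
      obtain ⟨h1, h2, h3⟩ := hp
      obtain ⟨ih1, ih2⟩ := ih (by rw [e, h2, h3])
      subst h1
      refine ⟨by simp [ih1], ?_⟩
      simp [ih2]
      exact fun e => hc e.symm

-- first-colon argument: "q:" is a prefix of "h:" ++ t iff q = h, for colon-free q and h
lemma pvAux {t : List Char} : ∀ (q h : List Char), ':' ∉ q → ':' ∉ h →
    (q ++ [':']) <+: (h ++ ':' :: t) → q = h := by
  intro q
  induction q with
  | nil =>
    intro h _ hh hpre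
    cases h with
    | nil => rfl
    | cons d h' =>
      obtain ⟨u, hu⟩ := hpre
      simp at hu
      simp at hh
      exact absurd hu.1 hh.1
  | cons a q' ih =>
    intro h hq hh hpre
    cases h with
    | nil =>
      obtain ⟨u, hu⟩ := hpre
      simp at hu
      simp at hq
      exact absurd hu.1 (fun e => hq.1 e.symm)
    | cons d h' =>
      obtain ⟨u, hu⟩ := hpre
      simp at hu
      have := ih h' (fun m => hq (List.mem_cons_of_mem _ m)) (fun m => hh (List.mem_cons_of_mem _ m))
        ⟨u, by simpa using hu.2⟩
      simp [hu.1, this]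

lemma pvPrefix_colon_iff {q h t : List Char} (hq : ':' ∉ q) (hh : ':' ∉ h) :
    PySem.Chars.startswith (h ++ ':' :: t) (q ++ [':']) = true ↔ q = h := by
  rw [PySem.Chars.startswith_iff]
  constructor
  · exact pvAux q h hq hh
  · rintro rfl
    exact ⟨t, by simp⟩

-- a colon-containing prefix cannot be a prefix of a colon-free string
lemma pvNoColon_not_startswith {cs p : List Char} (hc : ':' ∉ cs) (hp : ':' ∈ p) :
    PySem.Chars.startswith cs p = false := by
  cases hb : PySem.Chars.startswith cs p
  · rfl
  · exact absurd (((PySem.Chars.startswith_iff cs p).mp hb).subset hp) hc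

lemma pvTableItems : pvRefTable.items =
    [("value_type:".toList, "value_type"),
     ("value:".toList, "value_type"),
     ("interface:".toList, "interface"),
     ("shared_property:".toList, "shared_property"),
     ("shared:".toList, "shared_property"),
     ("object_type:".toList, "object_type"),
     ("object:".toList, "object"),
     ("class:".toList, "object")] := by decide

lemma pvNotStartswith_of_ne {h t q : List Char} (hh : ':' ∉ h) (hq : ':' ∉ q)
    (hne : ¬ h = q) : PySem.Chars.startswith (h ++ ':' :: t) (q ++ [':']) = false := by
  cases hb : PySem.Chars.startswith (h ++ ':' :: t) (q ++ [':'])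
  · rfl
  · exact absurd ((pvPrefix_colon_iff hq hh).mp hb) (fun e => hne e.symm)

lemma pvGetNone {h : List Char}
    (n1 : ¬ h = "value_type".toList) (n2 : ¬ h = "value".toList)
    (n3 : ¬ h = "interface".toList) (n4 : ¬ h = "shared_property".toList)
    (n5 : ¬ h = "shared".toList) (n6 : ¬ h = "object_type".toList)
    (n7 : ¬ h = "object".toList) (n8 : ¬ h = "class".toList) :
    pvRefTable.get? (h ++ [':']) = none := by
  have htab : pvRefTable = PySem.Dict.mk
    [("value_type:".toList, "value_type"),
     ("value:".toList, "value_type"),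
     ("interface:".toList, "interface"),
     ("shared_property:".toList, "shared_property"),
     ("shared:".toList, "shared_property"),
     ("object_type:".toList, "object_type"),
     ("object:".toList, "object"),
     ("class:".toList, "object")] := by decide
  rw [htab,
    show ("value_type:".toList : List Char) = "value_type".toList ++ [':'] from rfl,
    show ("value:".toList : List Char) = "value".toList ++ [':'] from rfl,
    show ("interface:".toList : List Char) = "interface".toList ++ [':'] from rfl,
    show ("shared_property:".toList : List Char) = "shared_property".toList ++ [':'] from rfl,
    show ("shared:".toList : List Char) = "shared".toList ++ [':'] from rfl,
    show ("object_type:".toList : List Char) = "object_type".toList ++ [':'] from rfl,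
    show ("object:".toList : List Char) = "object".toList ++ [':'] from rfl,
    show ("class:".toList : List Char) = "class".toList ++ [':'] from rfl]
  simp only [PySem.Dict.get?_mk_cons, beq_iff_eq, List.append_left_inj]
  split_ifs with a1 a2 a3 a4 a5 a6 a7 a8
  · exact absurd a1.symm n1
  · exact absurd a2.symm n2
  · exact absurd a3.symm n3
  · exact absurd a4.symm n4
  · exact absurd a5.symm n5
  · exact absurd a6.symm n6
  · exact absurd a7.symm n7
  · exact absurd a8.symm n8
  · rfl

theorem canonicalize_ref_py_spec : Claim_equal_canonicalize_ref_py := by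
  intro raw _
  unfold Spec_canonicalize_ref_py canonicalize_ref_py canonicalize_ref_py_alt
  set cs := PySem.Chars.strip raw.toList with hcs
  by_cases hnil : cs = []
  · simp [hnil]
  · simp only [if_neg hnil]
    rcases e : pvPartColon cs with ⟨h, s, t⟩
    cases s with
    | false =>
      obtain ⟨-, -, hc⟩ := pvPartColon_false e
      simp only [pvTableItems, pvScanA]
      simp [pvNoColon_not_startswith hc]
    | true =>
      obtain ⟨hdec, hh⟩ := pvPartColon_true e
      have hsw : ∀ q : List Char, ':' ∉ q →
          PySem.Chars.startswith cs (q ++ [':']) = decide (q = h) := by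
        intro q hq
        by_cases hqe : q = h
        · subst hqe
          simp [hdec, (pvPrefix_colon_iff hq hh).mpr rfl]
        · rw [hdec, pvNotStartswith_of_ne hh hq (fun e' => hqe e'.symm)]
          simp [hqe]
      have hdrop : ∀ q : List Char, q = h → cs.drop (q ++ [':']).length = t := by
        rintro q rfl
        rw [hdec, show q ++ ':' :: t = (q ++ [':']) ++ t by simp, List.drop_left]
      have s1 := hsw "value_type".toList (by decide)
      have s2 := hsw "value".toList (by decide)
      have s3 := hsw "interface".toList (by decide)
      have s4 := hsw "shared_property".toList (by decide)
      have s5 := hsw "shared".toList (by decide)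
      have s6 := hsw "object_type".toList (by decide)
      have s7 := hsw "object".toList (by decide)
      have s8 := hsw "class".toList (by decide)
      simp only [pvTableItems]
      simp only [pvScanA,
        show ("value_type:".toList : List Char) = "value_type".toList ++ [':'] from rfl,
        show ("value:".toList : List Char) = "value".toList ++ [':'] from rfl,
        show ("interface:".toList : List Char) = "interface".toList ++ [':'] from rfl,
        show ("shared_property:".toList : List Char) = "shared_property".toList ++ [':'] from rfl,
        show ("shared:".toList : List Char) = "shared".toList ++ [':'] from rfl,
        show ("object_type:".toList : List Char) = "object_type".toList ++ [':'] from rfl,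
        show ("object:".toList : List Char) = "object".toList ++ [':'] from rfl,
        show ("class:".toList : List Char) = "class".toList ++ [':'] from rfl,
        s1, s2, s3, s4, s5, s6, s7, s8]
      by_cases h1 : h = "value_type".toList
      · subst h1; rw [hdec]; rfl
      · by_cases h2 : h = "value".toList
        · subst h2; rw [hdec]; rfl
        · by_cases h3 : h = "interface".toList
          · subst h3; rw [hdec]; rfl
          · by_cases h4 : h = "shared_property".toList
            · subst h4; rw [hdec]; rfl
            · by_cases h5 : h = "shared".toList
              · subst h5; rw [hdec]; rfl
              · by_cases h6 : h = "object_type".toList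
                · subst h6; rw [hdec]; rfl
                · by_cases h7 : h = "object".toList
                  · subst h7; rw [hdec]; rfl
                  · by_cases h8 : h = "class".toList
                    · subst h8; rw [hdec]; rfl
                    · simp only [decide_eq_true_eq]
                      split_ifs with a1 a2 a3 a4 a5 a6 a7 a8
                      · exact absurd a1.symm h1
                      · exact absurd a2.symm h2
                      · exact absurd a3.symm h3
                      · exact absurd a4.symm h4
                      · exact absurd a5.symm h5
                      · exact absurd a6.symm h6
                      · exact absurd a7.symm h7
                      · exact absurd a8.symm h8
                      · simp [pvGetNone h1 h2 h3 h4 h5 h6 h7 h8]
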